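-- pv_equiv track=rewrite | github.com/airbytehq/airbyte | airbyte-integrations/connectors/source-active-directory/source_active_directory/streams/acls.py | _get_primary_object_class
-- ===== SOURCE A (Python) =====
-- from typing import Any, Iterable, Mapping, Optional, List, Dict
--
-- def _get_primary_object_class(object_classes: List[str]) -> str:
--     """Determine the primary object class from a list of object classes."""
--     # Priority order for determining primary class - matches our available streams
--     priority_classes = [
--         # Core identity objects (highest priority)
--         'user', 'group', 'computer', 'contact',
--
--         # Organizational structure
--         'organizationalUnit', 'container', 'domain', 'domainDNS',
--
--         # Group Policy objects
--         'groupPolicyContainer',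
--
--         # Network topology
--         'site', 'subnet', 'siteLink',
--
--         # Service accounts and special principals
--         'msDS-GroupManagedServiceAccount', 'foreignSecurityPrincipal',
--
--         # Infrastructure objects
--         'configuration', 'crossRef', 'serviceConnectionPoint',
--
--         # Security and certificates
--         'trustedDomain', 'ntAuthStore', 'pKICertificateTemplate',
--
--         # Fallback for common containers
--         'organizationalPerson', 'person', 'top'
--     ]
--
--     for priority_class in priority_classes:
--         if priority_class in object_classes:
--             return priority_class
--
--     # Return the last (most specific) class if no priority match
--     return object_classes[-1] if object_classes else 'unknown'
-- ===== SOURCE B (Python) =====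
-- # B: invert the traversal -- scan the input once keeping the element with the
-- # smallest priority rank, instead of scanning the priority list testing membership.
-- _PRIORITY = [
--     'user', 'group', 'computer', 'contact',
--     'organizationalUnit', 'container', 'domain', 'domainDNS',
--     'groupPolicyContainer',
--     'site', 'subnet', 'siteLink',
--     'msDS-GroupManagedServiceAccount', 'foreignSecurityPrincipal',
--     'configuration', 'crossRef', 'serviceConnectionPoint',
--     'trustedDomain', 'ntAuthStore', 'pKICertificateTemplate',
--     'organizationalPerson', 'person', 'top'
-- ]
--
-- def _get_primary_object_class(object_classes):
--     best_rank, best = len(_PRIORITY), None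
--     for c in object_classes:
--         try:
--             r = _PRIORITY.index(c)
--         except ValueError:
--             continue
--         if r < best_rank:
--             best_rank, best = r, c
--     if best is not None:
--         return best
--     # last (most specific) class, or 'unknown' for an empty list
--     return next(reversed(object_classes), 'unknown')
-- ===== Notes on version B (the rewrite author's own statement) =====
-- stated objective: alternative
-- what changed: Inverts the traversal: instead of scanning the constant priority list and testing membership in the input, B scans the input once keeping the element with the smallest priority rank (list.index), then falls back to the last element / 'unknown' via next(reversed(...), 'unknown').
import Mathlib
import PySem

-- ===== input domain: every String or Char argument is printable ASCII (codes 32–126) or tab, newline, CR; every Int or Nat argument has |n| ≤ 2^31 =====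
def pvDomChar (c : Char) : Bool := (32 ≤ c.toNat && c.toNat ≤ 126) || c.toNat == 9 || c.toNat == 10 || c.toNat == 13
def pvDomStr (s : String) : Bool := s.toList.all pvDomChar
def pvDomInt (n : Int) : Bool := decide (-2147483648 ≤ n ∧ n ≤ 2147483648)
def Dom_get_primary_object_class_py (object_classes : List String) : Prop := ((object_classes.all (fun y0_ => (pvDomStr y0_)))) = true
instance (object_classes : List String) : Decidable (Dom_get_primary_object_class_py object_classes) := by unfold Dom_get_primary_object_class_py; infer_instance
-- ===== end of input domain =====

-- B inverts the traversal (scan the input keeping the smallest priority rank instead of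
-- scanning the priority table testing membership); objective: alternative, same cost.

-- shared constant table of priority classes (the same literal both Pythons carry)
def pvPriority : List String :=
  ["user", "group", "computer", "contact",
   "organizationalUnit", "container", "domain", "domainDNS",
   "groupPolicyContainer",
   "site", "subnet", "siteLink",
   "msDS-GroupManagedServiceAccount", "foreignSecurityPrincipal",
   "configuration", "crossRef", "serviceConnectionPoint",
   "trustedDomain", "ntAuthStore", "pKICertificateTemplate",
   "organizationalPerson", "person", "top"]

-- ===== PORT A =====
-- the 'for priority_class in priority_classes: if … return' loop, with A's fallback line
def pvLoopA (object_classes : List String) : List String → String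
  | [] =>
      -- return object_classes[-1] if object_classes else 'unknown'
      if object_classes.isEmpty then "unknown"
      else (PySem.List.pyGet? object_classes (-1)).getD "unknown"
  | p :: rest =>
      if object_classes.contains p then p else pvLoopA object_classes rest

def get_primary_object_class_py (object_classes : List String) : String :=
  pvLoopA object_classes pvPriority

-- ===== PORT B =====
-- one step of B's loop over the input: keep (best_rank, best) if _PRIORITY.index raises
-- or the rank is not smaller, else take (r, c)
def pvStepB (st : Nat × Option String) (c : String) : Nat × Option String :=
  match PySem.List.index? pvPriority c with
  | none => st
  | some r => if r < st.1 then (r, some c) else st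

def get_primary_object_class_py_alt (object_classes : List String) : String :=
  match (object_classes.foldl pvStepB (pvPriority.length, none)).2 with
  | some best => best
  | none => (object_classes.getLast?).getD "unknown"   -- next(reversed(...), 'unknown')

-- ===== PRECONDITION & SPEC =====
def Spec_get_primary_object_class_py (object_classes : List String) (out : String) : Prop := out = get_primary_object_class_py_alt object_classes
instance (object_classes : List String) (out : String) : Decidable (Spec_get_primary_object_class_py object_classes out) := by unfold Spec_get_primary_object_class_py; infer_instance

-- ===== CLAIM (what is proved, stated in full; the proofs are below) =====
def Claim_equal_get_primary_object_class_py : Prop := ∀ (object_classes : List String), Dom_get_primary_object_class_py object_classes → Spec_get_primary_object_class_py object_classes (get_primary_object_class_py object_classes)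

-- ===== LEMMAS AND PROOFS =====

-- the running minimum rank of B's loop, as a standalone fold
def pvMin (xs : List String) (br : Nat) : Nat :=
  xs.foldl (fun m c =>
    match PySem.List.index? pvPriority c with
    | none => m
    | some i => if i < m then i else m) br

theorem pvMin_cons_none (c : String) (xs : List String) (br : Nat)
    (h : PySem.List.index? pvPriority c = none) : pvMin (c :: xs) br = pvMin xs br := by
  simp only [pvMin, List.foldl_cons, h]

theorem pvMin_cons_some (c : String) (xs : List String) (br i : Nat)
    (h : PySem.List.index? pvPriority c = some i) :
    pvMin (c :: xs) br = pvMin xs (if i < br then i else br) := by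
  simp only [pvMin, List.foldl_cons, h]

theorem pvMin_le (xs : List String) (br : Nat) : pvMin xs br ≤ br := by
  induction xs generalizing br with
  | nil => simp [pvMin]
  | cons c xs ih =>
      cases h : PySem.List.index? pvPriority c with
      | none => rw [pvMin_cons_none c xs br h]; exact ih br
      | some i =>
          rw [pvMin_cons_some c xs br i h]
          by_cases hi : i < br
          · rw [if_pos hi]; exact le_trans (ih i) (le_of_lt hi)
          · rw [if_neg hi]; exact ih br

theorem pvFold_spec (xs : List String) (br : Nat) (b : Option String) (hbr : br ≤ pvPriority.length) :
    xs.foldl pvStepB (br, b) =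
      (pvMin xs br, if pvMin xs br < br then some (pvPriority.getD (pvMin xs br) "") else b) := by
  induction xs generalizing br b with
  | nil => simp [pvMin]
  | cons c xs ih =>
      rw [List.foldl_cons]
      cases h : PySem.List.index? pvPriority c with
      | none =>
          have hs : pvStepB (br, b) c = (br, b) := by simp only [pvStepB, h]
          rw [hs, pvMin_cons_none c xs br h]
          exact ih br b hbr
      | some i =>
          by_cases hi : i < br
          · have hs : pvStepB (br, b) c = (i, some c) := by simp only [pvStepB, h]; rw [if_pos hi]
            rw [hs, ih i (some c) (le_of_lt (lt_of_lt_of_le hi hbr)),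
              pvMin_cons_some c xs br i h, if_pos hi]
            have hmle : pvMin xs i ≤ i := pvMin_le xs i
            have hmlt : pvMin xs i < br := lt_of_le_of_lt hmle hi
            rw [if_pos hmlt]
            by_cases hm : pvMin xs i < i
            · rw [if_pos hm]
            · obtain ⟨hk, hck, -⟩ := PySem.List.getElem_of_index?_eq_some h
              have heq : pvMin xs i = i := le_antisymm hmle (not_lt.mp hm)
              rw [if_neg hm, heq, List.getD_eq_getElem _ _ hk, hck]
          · have hs : pvStepB (br, b) c = (br, b) := by simp only [pvStepB, h]; rw [if_neg hi]
            rw [hs, pvMin_cons_some c xs br i h, if_neg hi]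
            exact ih br b hbr

theorem pvMin_le_rank (xs : List String) : ∀ (br : Nat) (c : String), c ∈ xs →
    ∀ (i : Nat), PySem.List.index? pvPriority c = some i → pvMin xs br ≤ i := by
  induction xs with
  | nil => intro br c hc; cases hc
  | cons d xs ih =>
      intro br c hc i hi
      rcases List.mem_cons.mp hc with rfl | hmem
      · rw [pvMin_cons_some c xs br i hi]
        by_cases h : i < br
        · rw [if_pos h]; exact pvMin_le xs i
        · rw [if_neg h]; exact le_trans (pvMin_le xs br) (not_lt.mp h)
      · cases h : PySem.List.index? pvPriority d with
        | none => rw [pvMin_cons_none d xs br h]; exact ih br c hmem i hi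
        | some j =>
            rw [pvMin_cons_some d xs br j h]
            by_cases hj : j < br
            · rw [if_pos hj]; exact ih j c hmem i hi
            · rw [if_neg hj]; exact ih br c hmem i hi

theorem pvMin_attained (xs : List String) : ∀ (br : Nat), pvMin xs br < br →
    ∃ c ∈ xs, PySem.List.index? pvPriority c = some (pvMin xs br) := by
  induction xs with
  | nil => intro br h; simp [pvMin] at h
  | cons c xs ih =>
      intro br h
      cases hc : PySem.List.index? pvPriority c with
      | none =>
          rw [pvMin_cons_none c xs br hc] at h ⊢
          obtain ⟨d, hd, hdi⟩ := ih br h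
          exact ⟨d, List.mem_cons_of_mem _ hd, hdi⟩
      | some i =>
          rw [pvMin_cons_some c xs br i hc] at h ⊢
          by_cases hi : i < br
          · rw [if_pos hi] at h ⊢
            by_cases hm : pvMin xs i < i
            · obtain ⟨d, hd, hdi⟩ := ih i hm
              exact ⟨d, List.mem_cons_of_mem _ hd, hdi⟩
            · have heq : pvMin xs i = i := le_antisymm (pvMin_le xs i) (not_lt.mp hm)
              exact ⟨c, List.mem_cons_self .., by rw [hc, heq]⟩
          · rw [if_neg hi] at h ⊢
            obtain ⟨d, hd, hdi⟩ := ih br h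
            exact ⟨d, List.mem_cons_of_mem _ hd, hdi⟩

-- A's loop returns Q[m] when m is the first index of Q whose entry is in xs
theorem pvLoopA_of_first (xs : List String) : ∀ (Q : List String) (m : Nat) (hm : m < Q.length),
    Q[m] ∈ xs → (∀ j (hj : j < m), Q[j]'(lt_trans hj hm) ∉ xs) → pvLoopA xs Q = Q[m] := by
  intro Q
  induction Q with
  | nil => intro m hm; simp at hm
  | cons q Q ih =>
      intro m hm hmem hbefore
      cases m with
      | zero =>
          simp only [List.getElem_cons_zero] at hmem ⊢
          simp [pvLoopA, List.contains_eq_mem, hmem]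
      | succ n =>
          have h0 : q ∉ xs := by
            have := hbefore 0 (Nat.succ_pos n)
            simpa using this
          simp only [List.getElem_cons_succ] at hmem ⊢
          simp only [pvLoopA, List.contains_eq_mem, h0, decide_false, Bool.false_eq_true,
            if_false]
          exact ih n (by simpa using hm) hmem (fun j hj => by
            have := hbefore (j + 1) (Nat.succ_lt_succ hj)
            simpa using this)

theorem pvLoopA_none (xs : List String) : ∀ (Q : List String), (∀ p ∈ Q, p ∉ xs) →
    pvLoopA xs Q =
      (if xs.isEmpty then "unknown" else (PySem.List.pyGet? xs (-1)).getD "unknown") := by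
  intro Q
  induction Q with
  | nil => intro _; rfl
  | cons q Q ih =>
      intro h
      have hq : q ∉ xs := h q (List.mem_cons_self ..)
      simp only [pvLoopA, List.contains_eq_mem, hq, decide_false, Bool.false_eq_true, if_false]
      exact ih (fun p hp => h p (List.mem_cons_of_mem _ hp))

-- the two fallback lines agree
theorem pvFallback_eq (xs : List String) :
    (if xs.isEmpty then "unknown" else (PySem.List.pyGet? xs (-1)).getD "unknown") =
      (xs.getLast?).getD "unknown" := by
  cases xs with
  | nil => rfl
  | cons x xs => simp [PySem.List.pyGet?_neg_one]

-- ===== VERDICT (by name: the statement is the Claim_ definition above) =====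
theorem get_primary_object_class_py_spec : Claim_equal_get_primary_object_class_py := by
  intro xs _
  unfold Spec_get_primary_object_class_py get_primary_object_class_py get_primary_object_class_py_alt
  rw [pvFold_spec xs pvPriority.length none (le_refl _)]
  set m := pvMin xs pvPriority.length with hm
  by_cases hlt : m < pvPriority.length
  · simp only [hlt, if_pos]
    obtain ⟨c, hcxs, hci⟩ := pvMin_attained xs pvPriority.length hlt
    obtain ⟨hk, hck, _⟩ := PySem.List.getElem_of_index?_eq_some hci
    have hfirst : ∀ j (hj : j < m), pvPriority[j]'(lt_trans hj hlt) ∉ xs := by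
      intro j hj hmem
      have hin : pvPriority[j]'(lt_trans hj hlt) ∈ pvPriority := List.getElem_mem _
      obtain ⟨i, hi⟩ := Option.isSome_iff_exists.mp
        ((PySem.List.index?_isSome_iff _ _).mpr hin)
      obtain ⟨hik, hick, hless⟩ := PySem.List.getElem_of_index?_eq_some hi
      have hile : i ≤ j := by
        by_contra hnot
        exact hless j (lt_of_not_ge hnot) rfl
      have := pvMin_le_rank xs pvPriority.length _ hmem i hi
      omega
    rw [pvLoopA_of_first xs pvPriority m hlt (hck ▸ hcxs) hfirst]
    simp [List.getD, List.getElem?_eq_getElem hlt]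
  · simp only [hlt, if_neg, not_false_iff]
    have hnone : ∀ p ∈ pvPriority, p ∉ xs := by
      intro p hp hmem
      obtain ⟨i, hi⟩ := Option.isSome_iff_exists.mp
        ((PySem.List.index?_isSome_iff _ _).mpr hp)
      obtain ⟨hik, _, _⟩ := PySem.List.getElem_of_index?_eq_some hi
      have := pvMin_le_rank xs pvPriority.length p hmem i hi
      omega
    rw [pvLoopA_none xs pvPriority hnone, pvFallback_eq]
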